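-- pv_equiv track=rewrite | github.com/Neo-Zapata/DBII-Project2 | backend/main.py | procesamiento_palabra
-- ===== SOURCE A (Python) =====
-- def procesamiento_palabra(word):
--     new_word = ""
--     abecedario = "abcdefghijklmnopqrstuvwxyz"
--     for c in word:
--         if c in abecedario:
--             new_word = new_word + c
--         else:
--             new_word = new_word + '-' # in case of rare characters
--     return new_word.strip('-') # we remove them
-- ===== SOURCE B (Python) =====
-- import re
--
-- def procesamiento_palabra(word):
--     return re.sub(r'[^a-z]', '-', word).strip('-')
-- ===== Notes on version B (the rewrite author's own statement) =====
-- stated objective: faster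
-- what changed: Replaces the explicit per-character loop with quadratic string concatenation and a membership test against a 26-letter alphabet string by a single regex substitution of non-lowercase characters with a dash, followed by the same strip of dashes.
import Mathlib
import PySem

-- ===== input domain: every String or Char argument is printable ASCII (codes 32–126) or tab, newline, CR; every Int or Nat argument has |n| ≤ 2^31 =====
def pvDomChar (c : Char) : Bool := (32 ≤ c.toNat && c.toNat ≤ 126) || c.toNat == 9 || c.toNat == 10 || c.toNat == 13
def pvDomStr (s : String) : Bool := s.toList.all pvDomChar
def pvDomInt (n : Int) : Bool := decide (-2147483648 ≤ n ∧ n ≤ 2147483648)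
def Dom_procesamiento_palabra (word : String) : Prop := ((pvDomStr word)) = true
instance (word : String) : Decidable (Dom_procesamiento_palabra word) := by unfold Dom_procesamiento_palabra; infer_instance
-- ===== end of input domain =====

-- B replaces A's explicit accumulation loop (membership test against the alphabet string,
-- quadratic concatenation) by a single regex substitution [^a-z] → '-' plus the same strip('-').

-- ===== PORT A =====
-- for c in word: new_word += (c if c in abecedario else '-'); return new_word.strip('-')
def procesamiento_palabra (word : String) : String :=
  let abecedario : String := "abcdefghijklmnopqrstuvwxyz"
  let new_word : String :=
    word.toList.foldl
      (fun acc c =>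
        if c ∈ abecedario.toList then acc.push c else acc.push '-')
      ""
  PySem.Str.stripChars new_word "-"

-- ===== PORT B =====
-- re.sub(r'[^a-z]', '-', word): the character class [a-z] is the range 'a' ≤ c ≤ 'z';
-- the substitution is a per-character map. Then .strip('-').
def procesamiento_palabra_alt (word : String) : String :=
  PySem.Str.stripChars
    (String.ofList (word.toList.map (fun c => if 'a' ≤ c ∧ c ≤ 'z' then c else '-')))
    "-"

-- ===== PRECONDITION & SPEC =====
def Spec_procesamiento_palabra (word : String) (out : String) : Prop := out = procesamiento_palabra_alt word
instance (word : String) (out : String) : Decidable (Spec_procesamiento_palabra word out) := by unfold Spec_procesamiento_palabra; infer_instance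

-- ===== CLAIM (what is proved, stated in full; the proofs are below) =====
def Claim_equal_procesamiento_palabra : Prop := ∀ (word : String), Dom_procesamiento_palabra word → Spec_procesamiento_palabra word (procesamiento_palabra word)

-- ===== LEMMAS AND PROOFS =====

-- per-character agreement: membership in the alphabet string = the range test of the regex class
theorem pv_alphabet_toList : "abcdefghijklmnopqrstuvwxyz".toList =
    ['a','b','c','d','e','f','g','h','i','j','k','l','m',
     'n','o','p','q','r','s','t','u','v','w','x','y','z'] := by rfl

theorem pv_char_class (c : Char) :
    (c ∈ "abcdefghijklmnopqrstuvwxyz".toList) ↔ ('a' ≤ c ∧ c ≤ 'z') := by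
  have hrange : ('a' ≤ c ∧ c ≤ 'z') ↔ 97 ≤ c.toNat ∧ c.toNat ≤ 122 := by
    simp only [Char.le_def, UInt32.le_iff_toNat_le]
    rfl
  rw [hrange, pv_alphabet_toList]
  constructor
  · intro h
    fin_cases h <;> exact ⟨by decide, by decide⟩
  · rintro ⟨h1, h2⟩
    have hc : c = Char.ofNat c.toNat := by simp [Char.ofNat_toNat]
    interval_cases h3 : c.toNat <;> simp [hc]

-- A's accumulation loop builds exactly the mapped list
theorem pv_foldl_push (f : Char → Char) (l : List Char) (s : String) :
    (l.foldl (fun acc c => acc.push (f c)) s).toList = s.toList ++ l.map f := by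
  induction l generalizing s with
  | nil => simp
  | cons c t ih =>
      simp only [List.foldl_cons, List.map_cons, ih, String.toList_push]
      simp

theorem pv_body_eq (word : String) :
    (word.toList.foldl
      (fun acc c =>
        if c ∈ "abcdefghijklmnopqrstuvwxyz".toList then acc.push c else acc.push '-')
      "") =
    String.ofList (word.toList.map (fun c => if 'a' ≤ c ∧ c ≤ 'z' then c else '-')) := by
  have hfun : (fun (acc : String) (c : Char) =>
      if c ∈ "abcdefghijklmnopqrstuvwxyz".toList then acc.push c else acc.push '-') =
      (fun acc c => acc.push (if 'a' ≤ c ∧ c ≤ 'z' then c else '-')) := by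
    funext acc c
    by_cases h : c ∈ "abcdefghijklmnopqrstuvwxyz".toList
    · rw [if_pos h, if_pos ((pv_char_class c).mp h)]
    · rw [if_neg h, if_neg (fun hr => h ((pv_char_class c).mpr hr))]
  apply String.toList_inj.mp
  rw [hfun, pv_foldl_push]
  simp

-- ===== VERDICT (by name: the statement is the Claim_ definition above) =====
theorem procesamiento_palabra_spec : Claim_equal_procesamiento_palabra := by
  intro word _
  show procesamiento_palabra word = procesamiento_palabra_alt word
  simp only [procesamiento_palabra, procesamiento_palabra_alt]
  rw [pv_body_eq]
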